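-- pv_equiv track=rewrite | github.com/apostolovbg/devcovenant | devcovenant/core/policies/docstring_and_comment_coverage/adapters/python.py | _has_comment_before
-- ===== SOURCE A (Python) =====
-- from typing import List, Set
--
-- def _has_comment_before(
--     line: int, comment_lines: Set[int], lookback: int = 3
-- ) -> bool:
--     """Check whether a comment exists in the preceding lines."""
--     for offset in range(lookback + 1):
--         target = line - offset
--         if target <= 0:
--             continue
--         if target in comment_lines:
--             return True
--     return False
-- ===== SOURCE B (Python) =====
-- def _has_comment_before(line, comment_lines, lookback=3):
--     """Check whether a comment exists in the preceding lines."""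
--     return any(c >= 1 and 0 <= line - c <= lookback for c in comment_lines)
-- ===== Notes on version B (the rewrite author's own statement) =====
-- stated objective: alternative
-- what changed: B iterates over the comment-line set testing whether each lies in the lookback window, instead of scanning the lookback+1 offsets and probing the set.
import Mathlib
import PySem

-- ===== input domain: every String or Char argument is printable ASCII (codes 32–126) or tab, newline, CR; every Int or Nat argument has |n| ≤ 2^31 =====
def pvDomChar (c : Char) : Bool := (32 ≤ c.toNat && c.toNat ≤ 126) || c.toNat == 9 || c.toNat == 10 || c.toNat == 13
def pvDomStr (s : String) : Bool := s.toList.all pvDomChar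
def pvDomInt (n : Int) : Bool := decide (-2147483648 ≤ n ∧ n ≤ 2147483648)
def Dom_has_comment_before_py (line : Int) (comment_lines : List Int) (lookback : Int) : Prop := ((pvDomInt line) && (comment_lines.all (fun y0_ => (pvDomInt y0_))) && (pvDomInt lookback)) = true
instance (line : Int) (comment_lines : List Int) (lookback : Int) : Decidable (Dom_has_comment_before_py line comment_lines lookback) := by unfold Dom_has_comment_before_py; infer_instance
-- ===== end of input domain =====

-- B tests each comment line against the lookback window instead of scanning the offset window and probing the set (alternative decomposition, same cost class).

-- ===== PORT A =====
-- for offset in range(lookback+1): target = line-offset; skip if target <= 0; return True if target in comment_lines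
def has_comment_before_py (line : Int) (comment_lines : List Int) (lookback : Int) : Bool :=
  (PySem.List.pyRange 0 (lookback + 1) 1).any (fun offset =>
    let target := line - offset
    if target ≤ 0 then false
    else comment_lines.contains target)

-- ===== PORT B =====
-- any(c >= 1 and 0 <= line - c <= lookback for c in comment_lines)
def has_comment_before_py_alt (line : Int) (comment_lines : List Int) (lookback : Int) : Bool :=
  comment_lines.any (fun c => decide (1 ≤ c) && decide (0 ≤ line - c) && decide (line - c ≤ lookback))

-- ===== PRECONDITION & SPEC =====
def Spec_has_comment_before_py (line : Int) (comment_lines : List Int) (lookback : Int) (out : Bool) : Prop := out = has_comment_before_py_alt line comment_lines lookback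
instance (line : Int) (comment_lines : List Int) (lookback : Int) (out : Bool) : Decidable (Spec_has_comment_before_py line comment_lines lookback out) := by unfold Spec_has_comment_before_py; infer_instance

-- ===== CLAIM (what is proved, stated in full; the proofs are below) =====
def Claim_equal_has_comment_before_py : Prop := ∀ (line : Int) (comment_lines : List Int) (lookback : Int), Dom_has_comment_before_py line comment_lines lookback → Spec_has_comment_before_py line comment_lines lookback (has_comment_before_py line comment_lines lookback)

-- ===== LEMMAS AND PROOFS =====

theorem has_comment_before_eq (line : Int) (comment_lines : List Int) (lookback : Int) :
    has_comment_before_py line comment_lines lookback = has_comment_before_py_alt line comment_lines lookback := by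
  unfold has_comment_before_py has_comment_before_py_alt
  rw [Bool.eq_iff_iff]
  simp only [List.any_eq_true, PySem.List.mem_pyRange_one, List.contains_eq_mem]
  constructor
  · rintro ⟨offset, ⟨h0, hlt⟩, hb⟩
    by_cases hle : line - offset ≤ 0
    · simp [hle] at hb
    · simp only [hle, if_false, decide_eq_true_eq] at hb
      exact ⟨line - offset, hb, by simp; omega⟩
  · rintro ⟨c, hc, hb⟩
    simp only [Bool.and_eq_true, decide_eq_true_eq] at hb
    refine ⟨line - c, by omega, ?_⟩
    have h2 : ¬ (line - (line - c) ≤ 0) := by omega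
    simp [hc]; omega

-- ===== VERDICT (by name: the statement is the Claim_ definition above) =====
theorem has_comment_before_py_spec : Claim_equal_has_comment_before_py := by
  intro line cl lb _
  unfold Spec_has_comment_before_py
  exact has_comment_before_eq line cl lb
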